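-- pv_equiv track=rewrite | github.com/CodyAustinDavis/dash_observability_advisor | data_functions/utils.py | group_changes_by_row
-- ===== SOURCE A (Python) =====
-- def group_changes_by_row(changes, row_index_col = 'rowIndex'):
--     try:
--
--         if changes:
--
--             grouped_changes = {}
--             for change in changes:
--                 row_index = change[row_index_col]
--                 if row_index not in grouped_changes:
--                     grouped_changes[row_index] = change.copy()
--                 else:
--                     for k, v in change.items():
--                         if v:
--                             grouped_changes[row_index][k] = v
--
--             return list(grouped_changes.values())
--
--         else:
--             return []
--
--     except Exception as e:
--         raise(f"ERROR Grouping changes {changes} \n With error: {str(e)}")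
-- ===== SOURCE B (Python) =====
-- def group_changes_by_row(changes, row_index_col = 'rowIndex'):
--     try:
--         if changes:
--             # pass 1: bucket the change dicts by row index, first-seen order
--             buckets = {}
--             for change in changes:
--                 buckets.setdefault(change[row_index_col], []).append(change)
--             # pass 2: merge each bucket: base = first dict, later truthy values overwrite
--             merged = []
--             for bucket in buckets.values():
--                 base = bucket[0].copy()
--                 for extra in bucket[1:]:
--                     for k, v in extra.items():
--                         if v:
--                             base[k] = v
--                 merged.append(base)
--             return merged
--         else:
--             return []
--     except Exception as e:
--         raise(f"ERROR Grouping changes {changes} \n With error: {str(e)}")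
-- ===== Notes on version B (the rewrite author's own statement) =====
-- stated objective: alternative
-- what changed: B replaces A's single interleaved fold (merging each change into a growing dict-of-merged-dicts) with a two-phase decomposition: a first pass buckets the raw change dicts by row index, a second pass folds each bucket into a merged dict from its first element.
import Mathlib
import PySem

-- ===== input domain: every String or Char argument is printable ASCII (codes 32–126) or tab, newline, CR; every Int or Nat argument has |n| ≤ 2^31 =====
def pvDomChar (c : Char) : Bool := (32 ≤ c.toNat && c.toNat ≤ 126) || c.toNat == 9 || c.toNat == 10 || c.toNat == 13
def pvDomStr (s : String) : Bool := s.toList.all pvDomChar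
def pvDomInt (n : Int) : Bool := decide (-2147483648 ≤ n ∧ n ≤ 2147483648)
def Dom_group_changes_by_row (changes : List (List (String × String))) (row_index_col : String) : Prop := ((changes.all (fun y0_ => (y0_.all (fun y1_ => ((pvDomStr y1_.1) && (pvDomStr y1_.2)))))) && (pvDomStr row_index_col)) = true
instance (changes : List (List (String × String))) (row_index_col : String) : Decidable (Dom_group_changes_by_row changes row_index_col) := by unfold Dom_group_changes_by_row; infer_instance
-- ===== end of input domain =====

-- B changes A's single interleaved grouping-and-merging fold into a two-phase bucket-then-merge decomposition; equivalence of the return value is proved (A mutates nothing observable).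

-- shared inner loop of both Pythons: 'for k, v in …items(): if v: target[k] = v'
def pvOverwriteTruthy (g : PySem.Dict String String) (items : List (String × String)) : PySem.Dict String String :=
  items.foldl (fun g kv => if kv.2 ≠ "" then g.insert kv.1 kv.2 else g) g

-- ===== PORT A =====
-- literal port of A: one fold over changes building a dict row_index -> merged dict
def group_changes_by_row (changes : List (List (String × String))) (row_index_col : String) : List (List (String × String)) :=
  if changes = [] then []
  else
    let grouped : PySem.Dict String (PySem.Dict String String) :=
      changes.foldl (fun g change =>
        let d := PySem.Dict.ofList change
        let ri := d.getD row_index_col ""          -- change[row_index_col]; Pre_ guarantees the key is present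
        if g.contains ri = false then g.insert ri d
        else g.insert ri (pvOverwriteTruthy (g.getD ri PySem.Dict.empty) d.items)) PySem.Dict.empty
    grouped.values.map (fun d => d.items)

-- ===== PORT B =====
-- pass 2 over one bucket: base = bucket[0].copy(); fold the rest in
def pvMergeBucket (bucket : List (PySem.Dict String String)) : List (String × String) :=
  match bucket with
  | [] => []
  | base :: rest => (rest.foldl (fun acc d => pvOverwriteTruthy acc d.items) base).items

-- literal port of B: pass 1 buckets by row index (setdefault+append = modify with default []), pass 2 merges each bucket
def group_changes_by_row_alt (changes : List (List (String × String))) (row_index_col : String) : List (List (String × String)) :=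
  if changes = [] then []
  else
    let buckets : PySem.Dict String (List (PySem.Dict String String)) :=
      changes.foldl (fun b change =>
        let d := PySem.Dict.ofList change
        b.modify (d.getD row_index_col "") [] (fun l => l ++ [d])) PySem.Dict.empty
    buckets.values.map pvMergeBucket

-- ===== PRECONDITION & SPEC =====
-- Pre_ excludes exactly the inputs where some change dict lacks the row-index key: there
-- Python's change[row_index_col] raises KeyError and A's except clause raises TypeError.
def Pre_group_changes_by_row (changes : List (List (String × String))) (row_index_col : String) : Prop :=
  ∀ change ∈ changes, row_index_col ∈ change.map Prod.fst
instance (changes : List (List (String × String))) (row_index_col : String) : Decidable (Pre_group_changes_by_row changes row_index_col) := by unfold Pre_group_changes_by_row; infer_instance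

def pvWitness_group_changes_by_row : (List (List (String × String))) × String :=
  ([[("rowIndex", "1"), ("a", "x")], [("rowIndex", "1"), ("a", "")]], "rowIndex")

def Spec_group_changes_by_row (changes : List (List (String × String))) (row_index_col : String) (out : List (List (String × String))) : Prop := out = group_changes_by_row_alt changes row_index_col
instance (changes : List (List (String × String))) (row_index_col : String) (out : List (List (String × String))) : Decidable (Spec_group_changes_by_row changes row_index_col out) := by unfold Spec_group_changes_by_row; infer_instance

-- ===== CLAIM (what is proved, stated in full; the proofs are below) =====
def Claim_equal_group_changes_by_row : Prop := ∀ (changes : List (List (String × String))) (row_index_col : String), Dom_group_changes_by_row changes row_index_col → Pre_group_changes_by_row changes row_index_col → Spec_group_changes_by_row changes row_index_col (group_changes_by_row changes row_index_col)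

-- ===== LEMMAS AND PROOFS =====

-- the invariant tying A's state (merged dicts) to B's state (buckets of raw dicts)
def pvMergeBucketD : List (PySem.Dict String String) → PySem.Dict String String
  | [] => PySem.Dict.empty
  | base :: rest => rest.foldl (fun acc d => pvOverwriteTruthy acc d.items) base

def pvRel (g : PySem.Dict String (PySem.Dict String String))
    (b : PySem.Dict String (List (PySem.Dict String String))) : Prop :=
  g.items = b.items.map (fun p => (p.1, pvMergeBucketD p.2))
    ∧ (∀ p ∈ b.items, p.2 ≠ []) ∧ b.keys.Nodup

theorem pvMergeBucketD_append (l : List (PySem.Dict String String)) (hl : l ≠ [])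
    (d : PySem.Dict String String) :
    pvMergeBucketD (l ++ [d]) = pvOverwriteTruthy (pvMergeBucketD l) d.items := by
  match l with
  | [] => exact absurd rfl hl
  | base :: rest => simp [pvMergeBucketD, List.foldl_append]

theorem pvRel_keys {g b} (h : pvRel g b) : g.keys = b.keys := by
  simp only [PySem.Dict.keys, h.1, List.map_map]
  rfl

theorem pvRel_step (g : PySem.Dict String (PySem.Dict String String))
    (b : PySem.Dict String (List (PySem.Dict String String)))
    (h : pvRel g b) (ri : String) (d : PySem.Dict String String) :
    pvRel (if g.contains ri = false then g.insert ri d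
           else g.insert ri (pvOverwriteTruthy (g.getD ri PySem.Dict.empty) d.items))
          (b.modify ri [] (fun l => l ++ [d])) := by
  obtain ⟨hitems, hne, hnd⟩ := h
  have hkeys : g.keys = b.keys := pvRel_keys ⟨hitems, hne, hnd⟩
  have hgnd : g.keys.Nodup := hkeys ▸ hnd
  have hcontains : g.contains ri = b.contains ri := by
    rw [PySem.Dict.contains_eq_decide_mem_keys, PySem.Dict.contains_eq_decide_mem_keys, hkeys]
  have hmod : b.modify ri [] (fun l => l ++ [d]) = b.insert ri (b.getD ri [] ++ [d]) := rfl
  by_cases hc : b.contains ri = true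
  · -- key already present: both sides replace in place
    obtain ⟨p, hp, hp1⟩ : ∃ p ∈ b.items, p.1 = ri := by
      have := (PySem.Dict.contains_iff_mem_keys (d := b) (k := ri)).mp hc
      simpa only [PySem.Dict.keys, List.mem_map] using this
    obtain ⟨l, rfl⟩ : ∃ l, p = (ri, l) := ⟨p.2, by rw [← hp1]⟩
    have hbget : b.getD ri [] = l := PySem.Dict.getD_of_mem_items b hp hnd []
    have hlne : l ≠ [] := hne _ hp
    have hgmem : (ri, pvMergeBucketD l) ∈ g.items := by
      rw [hitems]; exact List.mem_map_of_mem hp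
    have hgget : g.getD ri PySem.Dict.empty = pvMergeBucketD l :=
      PySem.Dict.getD_of_mem_items g hgmem hgnd PySem.Dict.empty
    rw [hcontains, hc, hmod]
    simp only [Bool.true_eq_false, if_false]
    refine ⟨?_, ?_, ?_⟩
    · rw [PySem.Dict.items_insert_of_contains _ _ hc,
        PySem.Dict.items_insert_of_contains _ _ (by rw [hcontains]; exact hc),
        hitems, List.map_map, List.map_map]
      apply List.map_congr_left
      intro q hq
      by_cases hq1 : q.1 == ri
      · have hq1' : q.1 = ri := by simpa using hq1
        have hql : q.2 = l := by
          have : q = (ri, l) := by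
            have hnd' : (b.items.map Prod.fst).Nodup := by
              simpa only [PySem.Dict.keys] using hnd
            have hinj : ∀ x ∈ b.items, ∀ y ∈ b.items, x.1 = y.1 → x = y := by
              intro x hx y hy hxy
              exact List.inj_on_of_nodup_map hnd' hx hy hxy
            exact hinj q hq (ri, l) hp (by rw [hq1'])
          rw [this]
        simp only [Function.comp_apply, hq1', beq_self_eq_true, if_true]
        rw [hgget, hbget, pvMergeBucketD_append l hlne d]
      · simp only [Function.comp_apply, hq1, Bool.false_eq_true, if_false]
    · intro q hq
      rw [PySem.Dict.items_insert_of_contains _ _ hc] at hq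
      obtain ⟨r, hr, rfl⟩ := List.mem_map.mp hq
      by_cases hr1 : r.1 == ri
      · simp only [hr1, if_true]; simp
      · simp only [hr1, Bool.false_eq_true, if_false]; exact hne _ hr
    · exact PySem.Dict.nodup_keys_insert _ _ _ hnd
  · -- fresh key: both sides append
    have hc' : b.contains ri = false := by simpa using hc
    have hgc : g.contains ri = false := by rw [hcontains, hc']
    rw [hcontains, hc', hmod, PySem.Dict.getD_of_not_contains b [] hc']
    simp only [List.nil_append, if_true]
    refine ⟨?_, ?_, ?_⟩
    · rw [PySem.Dict.items_insert_of_not_contains _ _ hc',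
        PySem.Dict.items_insert_of_not_contains _ _ hgc, hitems, List.map_append]
      rfl
    · intro q hq
      rw [PySem.Dict.items_insert_of_not_contains _ _ hc'] at hq
      rcases List.mem_append.mp hq with h1 | h1
      · exact hne _ h1
      · simp only [List.mem_singleton] at h1; rw [h1]; simp
    · exact PySem.Dict.nodup_keys_insert _ _ _ hnd

theorem pvRel_foldl (cs : List (List (String × String))) (col : String)
    (g : PySem.Dict String (PySem.Dict String String))
    (b : PySem.Dict String (List (PySem.Dict String String))) (h : pvRel g b) :
    pvRel (cs.foldl (fun g change =>
        let d := PySem.Dict.ofList change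
        let ri := d.getD col ""
        if g.contains ri = false then g.insert ri d
        else g.insert ri (pvOverwriteTruthy (g.getD ri PySem.Dict.empty) d.items)) g)
      (cs.foldl (fun b change =>
        let d := PySem.Dict.ofList change
        b.modify (d.getD col "") [] (fun l => l ++ [d])) b) := by
  induction cs generalizing g b with
  | nil => exact h
  | cons c cs ih => exact ih _ _ (pvRel_step g b h _ _)

theorem pvMergeBucketD_items (l : List (PySem.Dict String String)) :
    (pvMergeBucketD l).items = pvMergeBucket l := by
  match l with
  | [] => rfl
  | base :: rest => rfl

-- ===== VERDICT (by name: the statement is the Claim_ definition above) =====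
theorem group_changes_by_row_spec : Claim_equal_group_changes_by_row := by
  intro changes col _ _
  unfold Spec_group_changes_by_row group_changes_by_row group_changes_by_row_alt
  by_cases hnil : changes = []
  · simp [hnil]
  · simp only [hnil, if_false]
    have h := pvRel_foldl changes col PySem.Dict.empty PySem.Dict.empty
      ⟨rfl, by simp [PySem.Dict.empty], by simp [PySem.Dict.keys, PySem.Dict.empty]⟩
    obtain ⟨hitems, -, -⟩ := h
    simp only [PySem.Dict.values, hitems, List.map_map]
    apply List.map_congr_left
    intro p _
    exact pvMergeBucketD_items p.2
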